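-- pv_equiv track=rewrite | github.com/jhouston2019/denialappealpro | backend/appeal_output_structure.py | strategy_layer_examples
-- ===== SOURCE A (Python) =====
-- from typing import Dict, List, Optional, Tuple
--
-- def strategy_layer_examples(denial_strategy: str, cpt_codes: Optional[str]) -> str:
--     """Concrete strategy lines the model should mirror (not generic filler)."""
--     s = (denial_strategy or '').lower()
--     lines = []
--     if s in ('coding_error',):
--         lines.append(
--             f'Modifier -25 (or applicable modifier) is appropriate to distinguish this separately identifiable evaluation '
--             f'from the procedural component when documentation supports a significant, separately identifiable service.'
--         )
--     if s in ('benefit_maximum', 'coding_error'):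
--         lines.append(
--             'This service meets criteria for separate reimbursement under applicable NCCI and payer policy when '
--             'documentation establishes a distinct session, anatomical site, or encounter from the bundled component.'
--         )
--     if s in ('medical_necessity', 'non_covered', 'experimental'):
--         lines.append(
--             'The denial does not reflect the documented clinical necessity in the record relative to the payer’s '
--             'stated medical policy and evidence-based criteria for this diagnosis and procedure mix.'
--         )
--     if s in ('prior_authorization', 'precertification'):
--         lines.append(
--             'Retroactive consideration is warranted where delay would have harmed the patient or where authorization '
--             'was impracticable under the circumstances documented.'
--         )
--     if s == 'timely_filing':
--         lines.append(
--             'The filing timeline supports an exception or equitable tolling when payer delay, misinformation, or '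
--             'administrative error contributed to the submission date.'
--         )
--     if not lines:
--         lines.append(
--             'The appeal should tie each payer-stated reason to specific documentation, policy language, and regulatory review standards.'
--         )
--     return '\n'.join(f'- {x}' for x in lines[:5])
-- ===== SOURCE B (Python) =====
-- from typing import Optional
--
-- # Data-driven rewrite: a single ordered rule table (applicable categories -> line)
-- # drives a one-time precomputation that maps every known category directly to its
-- # FINAL formatted output string; the function itself is a single lookup with the
-- # preformatted fallback as default.
--
-- _RULES = [
--     (('coding_error',),
--      'Modifier -25 (or applicable modifier) is appropriate to distinguish this separately identifiable evaluation '
--      'from the procedural component when documentation supports a significant, separately identifiable service.'),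
--     (('benefit_maximum', 'coding_error'),
--      'This service meets criteria for separate reimbursement under applicable NCCI and payer policy when '
--      'documentation establishes a distinct session, anatomical site, or encounter from the bundled component.'),
--     (('medical_necessity', 'non_covered', 'experimental'),
--      'The denial does not reflect the documented clinical necessity in the record relative to the payer\u2019s '
--      'stated medical policy and evidence-based criteria for this diagnosis and procedure mix.'),
--     (('prior_authorization', 'precertification'),
--      'Retroactive consideration is warranted where delay would have harmed the patient or where authorization '
--      'was impracticable under the circumstances documented.'),
--     (('timely_filing',),
--      'The filing timeline supports an exception or equitable tolling when payer delay, misinformation, or '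
--      'administrative error contributed to the submission date.'),
-- ]
--
-- _FALLBACK_OUT = '- ' + (
--     'The appeal should tie each payer-stated reason to specific documentation, policy language, and regulatory review standards.'
-- )
--
-- # precomputed at import: category -> fully formatted multi-line output
-- _OUT = {
--     k: '\n'.join('- ' + line for keys, line in _RULES if k in keys)
--     for k in dict.fromkeys(k for keys, _ in _RULES for k in keys)
-- }
--
--
-- def strategy_layer_examples(denial_strategy: str, cpt_codes: Optional[str]) -> str:
--     """Concrete strategy lines the model should mirror (not generic filler)."""
--     return _OUT.get((denial_strategy or '').lower(), _FALLBACK_OUT)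
-- ===== Notes on version B (the rewrite author's own statement) =====
-- stated objective: idiomatic
-- what changed: Replaced the hardcoded chain of five membership-guarded appends plus join-per-call by a data-driven ordered rule table ((categories, line) pairs) from which each category's complete formatted output string is precomputed once at import; the function body becomes a single dict lookup of the final string with the preformatted fallback as default.
import Mathlib
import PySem

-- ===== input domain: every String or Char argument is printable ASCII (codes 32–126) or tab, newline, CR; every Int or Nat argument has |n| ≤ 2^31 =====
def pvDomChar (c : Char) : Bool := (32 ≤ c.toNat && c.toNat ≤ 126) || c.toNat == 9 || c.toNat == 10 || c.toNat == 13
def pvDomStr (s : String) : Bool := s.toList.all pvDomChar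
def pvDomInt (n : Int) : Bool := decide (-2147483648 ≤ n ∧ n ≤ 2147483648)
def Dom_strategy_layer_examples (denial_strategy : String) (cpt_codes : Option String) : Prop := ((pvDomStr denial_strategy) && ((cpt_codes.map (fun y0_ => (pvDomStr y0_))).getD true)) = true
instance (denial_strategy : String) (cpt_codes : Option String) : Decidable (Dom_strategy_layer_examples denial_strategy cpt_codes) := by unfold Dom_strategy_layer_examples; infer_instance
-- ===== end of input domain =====

-- B replaces A's per-call chain of membership-guarded appends by a data-driven rule
-- table from which the final output string per category is precomputed once; the
-- function body is a single lookup (idiomatic; same cost).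

-- shared line constants (the literal strings both programs emit)
def pvLineModifier : String := "Modifier -25 (or applicable modifier) is appropriate to distinguish this separately identifiable evaluation from the procedural component when documentation supports a significant, separately identifiable service."
def pvLineNCCI : String := "This service meets criteria for separate reimbursement under applicable NCCI and payer policy when documentation establishes a distinct session, anatomical site, or encounter from the bundled component."
def pvLineMed : String := "The denial does not reflect the documented clinical necessity in the record relative to the payer’s stated medical policy and evidence-based criteria for this diagnosis and procedure mix."
def pvLineAuth : String := "Retroactive consideration is warranted where delay would have harmed the patient or where authorization was impracticable under the circumstances documented."
def pvLineTimely : String := "The filing timeline supports an exception or equitable tolling when payer delay, misinformation, or administrative error contributed to the submission date."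
def pvLineFallback : String := "The appeal should tie each payer-stated reason to specific documentation, policy language, and regulatory review standards."

-- ===== PORT A =====
def strategy_layer_examples (denial_strategy : String) (cpt_codes : Option String) : String :=
  let s := PySem.Str.lower (if denial_strategy == "" then "" else denial_strategy)
  let lines : List String := []
  let lines := if s == "coding_error" then lines ++ [pvLineModifier] else lines
  let lines := if s == "benefit_maximum" || s == "coding_error" then lines ++ [pvLineNCCI] else lines
  let lines := if s == "medical_necessity" || s == "non_covered" || s == "experimental" then lines ++ [pvLineMed] else lines
  let lines := if s == "prior_authorization" || s == "precertification" then lines ++ [pvLineAuth] else lines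
  let lines := if s == "timely_filing" then lines ++ [pvLineTimely] else lines
  let lines := if lines.isEmpty then lines ++ [pvLineFallback] else lines
  PySem.Str.join "\n" ((lines.take 5).map (fun x => "- " ++ x))

-- ===== PORT B =====
-- the ordered rule table: (applicable categories, line)
def pvRules : List (List String × String) :=
  [ (["coding_error"], pvLineModifier)
  , (["benefit_maximum", "coding_error"], pvLineNCCI)
  , (["medical_necessity", "non_covered", "experimental"], pvLineMed)
  , (["prior_authorization", "precertification"], pvLineAuth)
  , (["timely_filing"], pvLineTimely) ]

def pvFallbackOut : String := "- " ++ pvLineFallback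

-- precomputed: category -> fully formatted output ('\n'.join over the rules that apply)
def pvOut : PySem.Dict String String :=
  PySem.Dict.ofList
    ((PySem.List.dedup (pvRules.flatMap (fun r => r.1))).map
      (fun k => (k, PySem.Str.join "\n"
        (((pvRules.filter (fun r => r.1.contains k)).map (fun r => "- " ++ r.2))))))

def strategy_layer_examples_alt (denial_strategy : String) (cpt_codes : Option String) : String :=
  pvOut.getD (PySem.Str.lower (if denial_strategy == "" then "" else denial_strategy)) pvFallbackOut

-- ===== PRECONDITION & SPEC =====
def Spec_strategy_layer_examples (denial_strategy : String) (cpt_codes : Option String) (out : String) : Prop := out = strategy_layer_examples_alt denial_strategy cpt_codes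
instance (denial_strategy : String) (cpt_codes : Option String) (out : String) : Decidable (Spec_strategy_layer_examples denial_strategy cpt_codes out) := by unfold Spec_strategy_layer_examples; infer_instance

-- ===== CLAIM (what is proved, stated in full; the proofs are below) =====
def Claim_equal_strategy_layer_examples : Prop := ∀ (denial_strategy : String) (cpt_codes : Option String), Dom_strategy_layer_examples denial_strategy cpt_codes → Spec_strategy_layer_examples denial_strategy cpt_codes (strategy_layer_examples denial_strategy cpt_codes)

-- ===== LEMMAS AND PROOFS =====

-- both programs agree once the normalized strategy string s is fixed
theorem pvCore_eq (s : String) :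
    (let lines : List String := []
     let lines := if s == "coding_error" then lines ++ [pvLineModifier] else lines
     let lines := if s == "benefit_maximum" || s == "coding_error" then lines ++ [pvLineNCCI] else lines
     let lines := if s == "medical_necessity" || s == "non_covered" || s == "experimental" then lines ++ [pvLineMed] else lines
     let lines := if s == "prior_authorization" || s == "precertification" then lines ++ [pvLineAuth] else lines
     let lines := if s == "timely_filing" then lines ++ [pvLineTimely] else lines
     let lines := if lines.isEmpty then lines ++ [pvLineFallback] else lines
     PySem.Str.join "\n" ((lines.take 5).map (fun x => "- " ++ x)))
    = pvOut.getD s pvFallbackOut := by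
  by_cases h1 : s = "coding_error"
  · subst h1; rfl
  by_cases h2 : s = "benefit_maximum"
  · subst h2; rfl
  by_cases h3 : s = "medical_necessity"
  · subst h3; rfl
  by_cases h4 : s = "non_covered"
  · subst h4; rfl
  by_cases h5 : s = "experimental"
  · subst h5; rfl
  by_cases h6 : s = "prior_authorization"
  · subst h6; rfl
  by_cases h7 : s = "precertification"
  · subst h7; rfl
  by_cases h8 : s = "timely_filing"
  · subst h8; rfl
  · simp [pvOut, pvRules, pvFallbackOut, PySem.List.dedup, PySem.Set.ofList, PySem.Set.add,
        PySem.Dict.getD, PySem.Dict.get?, PySem.Dict.ofList, PySem.Dict.insert,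
        PySem.Dict.update, PySem.Dict.empty, PySem.Dict.contains, beq_iff_eq, PySem.Str.join,
        h1, h2, h3, h4, h5, h6, h7, h8, Ne.symm h1, Ne.symm h2, Ne.symm h3, Ne.symm h4,
        Ne.symm h5, Ne.symm h6, Ne.symm h7, Ne.symm h8]
    exact String.toList_injective (by simp)

-- ===== VERDICT (by name: the statement is the Claim_ definition above) =====
theorem strategy_layer_examples_spec : Claim_equal_strategy_layer_examples := by
  intro denial_strategy cpt_codes _
  unfold Spec_strategy_layer_examples strategy_layer_examples strategy_layer_examples_alt
  exact pvCore_eq _
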